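-- pv_equiv track=rewrite | github.com/kirankumarcs02/daily-coding | problems/exe_21.py | possible_overlapping
-- ===== SOURCE A (Python) =====
-- def possible_overlapping(intervals):
--     global_start_time = [start for start, end in intervals]
--     global_end_time = [end for start, end in intervals]
--     overlapping_count = 0
--     for (start, end), i in zip(intervals, range(len(intervals)-1)):
--         for j in range(i, len(intervals) - 1):
--             start_count = False
--             end_count = False
--             if global_start_time[j + 1] <= start and end >= global_end_time[j + 1]:
--                 start_count = True
--             if global_start_time[j + 1] >= end and end <= global_end_time[j + 1]:
--                 end_count = True
--             if start_count or end_count: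
--                 overlapping_count += 1
--     return overlapping_count
-- ===== SOURCE B (Python) =====
-- def possible_overlapping(intervals):
--     # Stream the intervals once, keeping the already-seen prefix; for each new
--     # interval count matches against the prefix by inclusion-exclusion.
--     total = 0
--     seen = []
--     for s2, e2 in intervals:
--         contained = sum(1 for s, e in seen if s2 <= s and e2 <= e)
--         after = sum(1 for s, e in seen if e <= s2 and e <= e2)
--         both = sum(1 for s, e in seen if e == e2 and e <= s2 <= s)
--         total += contained + after - both
--         seen.append((s2, e2))
--     return total
-- ===== Notes on version B (the rewrite author's own statement) =====
-- stated objective: alternative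
-- what changed: A's index-based nested range loops with boolean flags and global start/end arrays are replaced by a single streaming pass that keeps the already-seen prefix and counts each new interval's matches by inclusion-exclusion (contained + after - overlap of the two conditions).
import Mathlib
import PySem

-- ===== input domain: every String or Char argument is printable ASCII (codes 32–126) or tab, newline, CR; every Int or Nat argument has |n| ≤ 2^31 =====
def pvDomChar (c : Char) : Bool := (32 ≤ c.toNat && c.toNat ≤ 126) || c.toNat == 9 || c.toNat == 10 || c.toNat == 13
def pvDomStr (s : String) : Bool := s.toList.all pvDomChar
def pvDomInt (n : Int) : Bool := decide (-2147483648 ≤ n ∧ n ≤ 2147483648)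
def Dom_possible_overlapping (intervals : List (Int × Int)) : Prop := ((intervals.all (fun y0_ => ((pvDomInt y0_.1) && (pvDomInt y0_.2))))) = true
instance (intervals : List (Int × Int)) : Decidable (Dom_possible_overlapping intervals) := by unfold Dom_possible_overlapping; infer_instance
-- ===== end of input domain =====

-- B streams the list once, counting each new interval against the already-seen prefix by
-- inclusion–exclusion, instead of A's index-based nested ranges with boolean flags;
-- objective: alternative (same quadratic cost, different decomposition).

-- ===== PORT A =====
-- Python's global_start_time[j+1] / global_end_time[j+1] are always in range
-- (0 ≤ j+1 ≤ len-1 inside the loops), so pyGetD with default 0 is exact here.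
def possible_overlapping (intervals : List (Int × Int)) : Int :=
  let global_start_time := intervals.map (fun p => p.1)
  let global_end_time := intervals.map (fun p => p.2)
  let n : Int := intervals.length
  (intervals.zip (PySem.List.pyRange 0 (n - 1) 1)).foldl
    (fun acc pi =>
      (PySem.List.pyRange pi.2 (n - 1) 1).foldl
        (fun acc2 j =>
          let start_count :=
            decide (PySem.List.pyGetD global_start_time (j + 1) 0 ≤ pi.1.1) &&
            decide (pi.1.2 ≥ PySem.List.pyGetD global_end_time (j + 1) 0)
          let end_count :=
            decide (PySem.List.pyGetD global_start_time (j + 1) 0 ≥ pi.1.2) &&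
            decide (pi.1.2 ≤ PySem.List.pyGetD global_end_time (j + 1) 0)
          if start_count || end_count then acc2 + 1 else acc2)
        acc)
    0

-- ===== PORT B =====
def possible_overlapping_alt (intervals : List (Int × Int)) : Int :=
  (intervals.foldl
    (fun st b =>
      let contained : Int := st.2.countP (fun a => decide (b.1 ≤ a.1) && decide (b.2 ≤ a.2))
      let after : Int := st.2.countP (fun a => decide (a.2 ≤ b.1) && decide (a.2 ≤ b.2))
      let both : Int := st.2.countP (fun a => decide (a.2 = b.2) && decide (a.2 ≤ b.1) && decide (b.1 ≤ a.1))
      (st.1 + (contained + after - both), st.2 ++ [b]))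
    ((0 : Int), ([] : List (Int × Int)))).1

-- ===== PRECONDITION & SPEC =====
def Spec_possible_overlapping (intervals : List (Int × Int)) (out : Int) : Prop := out = possible_overlapping_alt intervals
instance (intervals : List (Int × Int)) (out : Int) : Decidable (Spec_possible_overlapping intervals out) := by unfold Spec_possible_overlapping; infer_instance

-- ===== CLAIM (what is proved, stated in full; the proofs are below) =====
def Claim_equal_possible_overlapping : Prop := ∀ (intervals : List (Int × Int)), Dom_possible_overlapping intervals → Spec_possible_overlapping intervals (possible_overlapping intervals)

-- ===== LEMMAS AND PROOFS =====

-- the pair predicate both programs count (a the earlier interval, b the later one)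
def pvP (a b : Int × Int) : Bool :=
  (decide (b.1 ≤ a.1) && decide (a.2 ≥ b.2)) || (decide (b.1 ≥ a.2) && decide (a.2 ≤ b.2))

-- reference value: sum over ordered pairs (earlier, later) of pvP
def pvF : List (Int × Int) → Int
  | [] => 0
  | a :: t => (t.countP (fun b => pvP a b) : Int) + pvF t

-- one element's inclusion–exclusion contribution equals its 0/1 contribution for pvP
lemma pv_delta (a b : Int × Int) :
    (if (decide (b.1 ≤ a.1) && decide (b.2 ≤ a.2)) = true then (1:Int) else 0)
        + (if (decide (a.2 ≤ b.1) && decide (a.2 ≤ b.2)) = true then (1:Int) else 0)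
        - (if (decide (a.2 = b.2) && decide (a.2 ≤ b.1) && decide (b.1 ≤ a.1)) = true then (1:Int) else 0)
        = (if pvP a b = true then (1:Int) else 0) := by
  simp only [pvP, Bool.and_eq_true, Bool.or_eq_true, decide_eq_true_eq, ge_iff_le]
  split_ifs <;> omega

-- B side: inclusion–exclusion over a prefix equals the countP of the disjunction
lemma pv_ie (s : List (Int × Int)) (b : Int × Int) :
    ((s.countP (fun a => decide (b.1 ≤ a.1) && decide (b.2 ≤ a.2)) : Int) +
      (s.countP (fun a => decide (a.2 ≤ b.1) && decide (a.2 ≤ b.2)) : Int) -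
      (s.countP (fun a => decide (a.2 = b.2) && decide (a.2 ≤ b.1) && decide (b.1 ≤ a.1)) : Int)) =
    (s.countP (fun a => pvP a b) : Int) := by
  induction s with
  | nil => simp
  | cons a t ih =>
    simp only [List.countP_cons]
    push_cast
    have := pv_delta a b
    omega

-- B's fold invariant: running total over the remaining list, given the seen prefix
lemma pv_B_invariant (l : List (Int × Int)) :
    ∀ (seen : List (Int × Int)) (total : Int),
    (l.foldl
      (fun st b =>
        let contained : Int := st.2.countP (fun a => decide (b.1 ≤ a.1) && decide (b.2 ≤ a.2))
        let after : Int := st.2.countP (fun a => decide (a.2 ≤ b.1) && decide (a.2 ≤ b.2))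
        let both : Int := st.2.countP (fun a => decide (a.2 = b.2) && decide (a.2 ≤ b.1) && decide (b.1 ≤ a.1))
        (st.1 + (contained + after - both), st.2 ++ [b]))
      (total, seen)).1 =
    total + (seen.map (fun a => (l.countP (fun b => pvP a b) : Int))).sum + pvF l := by
  induction l with
  | nil => intro seen total; simp [pvF]
  | cons b t ih =>
    intro seen total
    simp only [List.foldl_cons]
    rw [ih]
    simp only [List.map_append, List.sum_append, List.map, List.sum_cons, List.sum_nil, pvF]
    have hsplit : (seen.map (fun a => ((b :: t).countP (fun x => pvP a x) : Int))).sum =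
        (seen.map (fun a => (t.countP (fun x => pvP a x) : Int))).sum +
        (seen.map (fun a => if pvP a b then (1 : Int) else 0)).sum := by
      induction seen with
      | nil => simp
      | cons c s ihs =>
        simp only [List.map_cons, List.sum_cons]
        rw [ihs, List.countP_cons]
        push_cast
        omega
    rw [hsplit, PySem.List.sum_map_ite_one_zero, ← pv_ie seen b]
    ring

lemma pv_B_eq_F (l : List (Int × Int)) : possible_overlapping_alt l = pvF l := by
  unfold possible_overlapping_alt
  rw [pv_B_invariant l [] 0]
  simp

-- A side: the inner loop over range(i, n-1) counts pvP-matches of a against the suffix after index i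
lemma pv_A_inner (l : List (Int × Int)) (a : Int × Int) :
    ∀ (d : Nat) (i : Int) (acc : Int), 0 ≤ i → i + d = (l.length : Int) - 1 →
    (PySem.List.pyRange i ((l.length : Int) - 1) 1).foldl
      (fun acc2 j =>
        let start_count :=
          decide (PySem.List.pyGetD (l.map (fun p => p.1)) (j + 1) 0 ≤ a.1) &&
          decide (a.2 ≥ PySem.List.pyGetD (l.map (fun p => p.2)) (j + 1) 0)
        let end_count :=
          decide (PySem.List.pyGetD (l.map (fun p => p.1)) (j + 1) 0 ≥ a.2) &&
          decide (a.2 ≤ PySem.List.pyGetD (l.map (fun p => p.2)) (j + 1) 0)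
        if start_count || end_count then acc2 + 1 else acc2)
      acc =
    acc + ((l.drop (i + 1).toNat).countP (fun b => pvP a b) : Int) := by
  intro d
  induction d with
  | zero =>
    intro i acc h0 hi
    rw [PySem.List.pyRange_one_eq_nil (by omega)]
    have : (i + 1).toNat = l.length := by omega
    simp [this]
  | succ d ih =>
    intro i acc h0 hi
    rw [PySem.List.pyRange_one_cons (by omega)]
    simp only [List.foldl_cons]
    rw [ih (i + 1) _ (by omega) (by omega)]
    have hlt : (i + 1).toNat < l.length := by omega
    have hg : PySem.List.pyGetD (l.map (fun p => p.1)) (i + 1) 0 = (l[(i+1).toNat]).1 := by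
      rw [PySem.List.pyGetD_eq_getElem _ _ (by omega) (by rw [List.length_map]; omega)]
      simp
    have he : PySem.List.pyGetD (l.map (fun p => p.2)) (i + 1) 0 = (l[(i+1).toNat]).2 := by
      rw [PySem.List.pyGetD_eq_getElem _ _ (by omega) (by rw [List.length_map]; omega)]
      simp
    have hdrop : l.drop (i + 1).toNat = l[(i+1).toNat] :: l.drop ((i+1).toNat + 1) :=
      List.drop_eq_getElem_cons hlt
    have htn : (i + 1 + 1).toNat = (i + 1).toNat + 1 := by omega
    rw [hdrop, List.countP_cons, htn]
    simp only [hg, he, pvP]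
    by_cases hb : ((decide ((l[(i+1).toNat]).1 ≤ a.1) && decide (a.2 ≥ (l[(i+1).toNat]).2)) ||
        (decide ((l[(i+1).toNat]).1 ≥ a.2) && decide (a.2 ≤ (l[(i+1).toNat]).2))) = true <;>
      simp [hb] <;> omega

-- the flattened outer sum over the zipped suffix equals pvF of that suffix
lemma pv_A_outer (u : List (Int × Int)) :
    ∀ (k : Int) (full : List (Int × Int)), 0 ≤ k → full.drop k.toNat = u →
    ((u.zip (PySem.List.pyRange k ((full.length : Int) - 1) 1)).map
      (fun pi => ((full.drop (pi.2 + 1).toNat).countP (fun b => pvP pi.1 b) : Int))).sum = pvF u := by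
  induction u with
  | nil => intro k full h0 hd; simp [pvF]
  | cons a t ih =>
    intro k full h0 hd
    have hklt : k.toNat < full.length := by
      by_contra h
      rw [List.drop_eq_nil_of_le (by omega)] at hd
      exact List.cons_ne_nil a t hd.symm
    have hlen : full.length = k.toNat + t.length + 1 := by
      have := congrArg List.length hd
      rw [List.length_drop] at this
      simp at this
      omega
    cases t with
    | nil =>
      rw [PySem.List.pyRange_one_eq_nil (by simp at hlen ⊢; omega)]
      simp [pvF]
    | cons b t' =>
      have hcons : PySem.List.pyRange k ((full.length : Int) - 1) 1 =
          k :: PySem.List.pyRange (k + 1) ((full.length : Int) - 1) 1 :=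
        PySem.List.pyRange_one_cons (by simp [hlen]; omega)
      rw [hcons]
      have hdrop1 : full.drop ((k + 1).toNat) = b :: t' := by
        have h1 : (k + 1).toNat = k.toNat + 1 := by omega
        rw [h1, ← List.tail_drop, hd]
        rfl
      simp only [List.zip_cons_cons, List.map_cons, List.sum_cons]
      rw [ih (k + 1) full (by omega) hdrop1, hdrop1]
      simp [pvF]

lemma pv_A_eq_F (l : List (Int × Int)) : possible_overlapping l = pvF l := by
  unfold possible_overlapping
  rw [PySem.List.foldl_congr_mem _ _
    (fun acc pi => acc + ((l.drop (pi.2 + 1).toNat).countP (fun b => pvP pi.1 b) : Int)) _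
    (by
      intro acc x hx
      have hmem : x.2 ∈ PySem.List.pyRange 0 ((l.length : Int) - 1) 1 :=
        (List.of_mem_zip (by rwa [← Prod.mk.eta (p := x)] at hx)).2
      rw [PySem.List.mem_pyRange_one] at hmem
      exact pv_A_inner l x.1 ((l.length : Int) - 1 - x.2).toNat x.2 acc hmem.1 (by omega))]
  rw [PySem.List.foldl_add]
  rw [pv_A_outer l 0 l (by omega) (by simp)]
  ring

-- ===== VERDICT (by name: the statement is the Claim_ definition above) =====
theorem possible_overlapping_spec : Claim_equal_possible_overlapping := by
  intro intervals _
  unfold Spec_possible_overlapping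
  rw [pv_A_eq_F, pv_B_eq_F]
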